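/- GENERATED by mk_final_copies.py from the proof of the farm's unit `vorbis_decode_packet_rest.4d` (farm:vorbis_decode_packet_rest.4d.1: Lemmas.lean) as the
   re-elaboration sweep compiled it — do not edit. -/
import Asan.CheckWalk
import Vorbis.Spec.Units.vorbis_decode_packet_rest_4d

open X86 X86.User Asan Vorbis Vorbis.Spec Vorbis.Spec.vorbis_decode_packet_rest

set_option maxRecDepth 4000
set_option maxHeartbeats 4000000

namespace Vorbis.Spec.vorbis_decode_packet_rest_4d

/-- `shl r64, 2` is the multiplication by 4. -/
theorem shl2_eq_mul4 (w : UInt64) : w <<< 2 = w * 4 := by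
  bv_decide

/-- **The machine address of DECODE's translation load** `movsxd r12, r12d ; shl r12, 2 ; add r12, [rbx + 0x838]`, for `var ≥ −1`:
the number address `(sorted_values − 4) + 4·(var + 1)` of `Codebook.site_sortedValue` (`addr_add_word_mul4`). -/
theorem sv_addr (x : Word) (sv : Nat) (hv : -1 ≤ argInt x) (hsv : 4 ≤ sv) :
    Word.ofBV (BitVec.signExtend 64 (Word.part .w32 x)) <<< 2 + UInt64.ofNat sv
      = addr (sv - 4 + 4 * (argInt x + 1).toNat) := by
  rw [ofBV_signExtend64, part32_toInt, shl2_eq_mul4, UInt64.add_comm]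
  exact addr_add_word_mul4 sv _ hv hsv

/-- **Sub-segment D, PROVED**: 0x110cad–0x110cde, three check sites (`c->sparse`, `c->sorted_values`,
`sorted_values[var]` with the sentinel slot for `var = −1`: `Codebook.site_sortedValue`), no store but the checks' return addresses. -/
theorem segD {Lay : Layout} (hLay : Lay.hi = 0x1000000) {μ : Microarch} (hμ : UserX.MicroOK μ) {u₀ : State}
    (hcode : HasCodeNat Lay u₀ Vorbis.L.vorbis_decode_packet_rest.entry Vorbis.Code.code_vorbis_decode_packet_rest.nat Vorbis.L.vorbis_decode_packet_rest.size)
    (hl1 : Asan.SmallCheck Lay μ Vorbis.WayInv (Vorbis.CodeOK u₀) [.rax, .rdx] 1 Vorbis.L.__asan_load1_noabort.entry)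
    (hl8 : Asan.SmallCheck Lay μ Vorbis.WayInv (Vorbis.CodeOK u₀) [.rax, .rcx, .rdx] 8 Vorbis.L.__asan_load8_noabort.entry)
    (hl4 : Asan.SmallCheck Lay μ Vorbis.WayInv (Vorbis.CodeOK u₀) [.rax, .rcx, .rdx] 4 Vorbis.L.__asan_load4_noabort.entry) :
    Seg4d Lay μ u₀ := by
  intro others frames len Ar stored room mode ysz e ret i j k b v hat
  have he := hat.entry
  v_entry he
  have w_rip := hat.rip
  have w_rsp : v.reg .rsp = e.reg .rsp - 3000 := hat.rsp
  have hrsp_v : v.reg .rsp = e.reg .rsp - 3000 := hat.rsp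
  have w_eq : Mem.EqOn Vorbis.L.textLo Vorbis.L.textHi u₀.mem v.mem := hat.code
  have hdf : v.flags .df = false := (show abiInv _ from hat.abi).1
  have hmx : v.mxcsr &&& 0x1F80 = 0x1F80 := (show abiInv _ from hat.abi).2
  have hsse := Vorbis.sseOK_of_abiInv hat.abi
  -- the codebook
  obtain ⟨c, hc⟩ : ∃ c : Nat, stb_vorbis.codebooks_at v.mem (fOf e) b = c := ⟨_, rfl⟩
  have hrbxn : (v.reg .rbx).toNat = c := by rw [hat.rbx, hc]
  have hrbx : v.reg .rbx = addr c := eq_addr _ _ hrbxn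
  have hinv := hat.inv
  have hcb := hinv.fb.vorbis.codebooks
  obtain ⟨B, hB, hBin⟩ := CodebooksUpTo.book_in (groups_laws len) hcb hat.book_lt
  rw [hc] at hBin
  have hcok : CodebookOK (RunBlk Ar len) v.mem c := by
    have := hcb.ok b (by have := hat.book_lt; omega)
    rw [hc] at this
    exact this
  have hvar := hat.var
  rw [hc] at hvar
  -- where the struct is: in the data space, off the stack region
  have hBoff := hinv.offStack B hB
  have hBins := hinv.ok.inside B hB
  simp only [vblock, voff] at hBin hBins
  have hcw : c + 2120 ≤ 0xC00000 ∧ (c + 2120 ≤ 0x700000 ∨ 0x800000 ≤ c) := by omega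
  have r1b : v.mem.readLE (addr c + 0x1b) 1 = Codebook.sparse v.mem c := by simp only [vfield, vacc, voff]
  have r838 : v.mem.readLE (addr c + 0x838) 8 = Codebook.sorted_values v.mem c := by simp only [vfield, vacc, voff]
  have hL := hinv.live
  u_walk hcode [hμ.vendor] until [Vorbis.L.vorbis_decode_packet_rest.at_110ce2] span [Vorbis.L.textLo, Vorbis.L.textHi] side (v_side)
  · -- 0x110cb1: load1 c + 0x1b (`c->sparse`)
    have hun : ShadowUntouched v.mem s_110cb1.mem := by v_untouched
    have hs := Codebook.site_field hL hB (by simp only [vblock, voff]; exact hBin) 27 1 (by simp only [voff]; omega)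
      (by omega) (a := c + 27) rfl
    exact check_site hat.shadow hun hs (by u_omega)
  · -- 0x110cc3: load8 c + 0x838 (`c->sorted_values`)
    have hun : ShadowUntouched v.mem s_110cc3.mem := by v_untouched
    have hs := Codebook.site_field hL hB (by simp only [vblock, voff]; exact hBin) 2104 8 (by simp only [voff]; omega)
      (by omega) (a := c + 2104) rfl
    exact check_site hat.shadow hun hs (by u_omega)
  · -- 0x110cd9: load4 sorted_values + 4·sext(var), `var ≥ −1` (K4: the sentinel slot)
    have hun : ShadowUntouched v.mem s_110cd9.mem := by v_untouched
    have hsp : Codebook.sparse v.mem c ≠ 0 := by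
      intro h0
      rw [h0] at hbr_110cba
      exact hbr_110cba rfl
    have hse := hcok.se_pos_of_sparse hsp
    have hge := hcok.sorted_values_ge hinv.ok hse
    have hv1 : -1 ≤ argInt (v.reg .r12) := by
      rcases hvar with h1 | h2
      · omega
      · omega
    have hs := hcok.site_sortedValue hL hsp hvar rfl
    have hsv := hs.inside hinv.fb.env.covers
    rw [sv_addr _ _ hv1 (by omega)]
    exact check_site hat.shadow hun hs (toNat_addr _ (by omega))
  · -- dense book: `temp = var`
    refine ReachVia.done ?_
    have hsame : Mem.SameExcept [⟨(e.reg .rsp).toNat - 3856, (e.reg .rsp).toNat - 3000⟩] v.mem s_110cba.mem := by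
      u_same
    refine ⟨hat.toLoop4.stackOnly he_room he_top w_rsp w_eq ?_ (w_kept.get .rbp rfl) (w_kept.get .r14 rfl) hsame,
      w_rip, by rw [cdim_keep_stack he_room he_top hsame]; exact hat.k_lt⟩
    show (Vorbis.conv u₀).inv _
    v_inv
  · -- sparse book: `temp = c->sorted_values[var]`
    refine ReachVia.done ?_
    have hsame : Mem.SameExcept [⟨(e.reg .rsp).toNat - 3856, (e.reg .rsp).toNat - 3000⟩] v.mem s_110cde.mem := by
      u_same
    refine ⟨hat.toLoop4.stackOnly he_room he_top w_rsp w_eq ?_ (w_kept.get .rbp rfl) (w_kept.get .r14 rfl) hsame,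
      w_rip, by rw [cdim_keep_stack he_room he_top hsame]; exact hat.k_lt⟩
    show (Vorbis.conv u₀).inv _
    v_inv

end Vorbis.Spec.vorbis_decode_packet_rest_4d
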